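-- pv_equiv track=rewrite | github.com/eateren/advent-of-code-2020 | 17/aoc2020-17.py | findSpaceDim
-- ===== SOURCE A (Python) =====
-- def findSpaceDim(space):
--
--     minDim = [0, 0, 0]
--     maxDim = [0, 0, 0]
--
--
--     for key in space.keys():
--
--         for dim in range(3):
--
--             if key[dim] < minDim[dim]:
--                 minDim[dim] = key[dim]
--             elif key[dim] > maxDim[dim]:
--                 maxDim[dim] = key[dim]
--
--     return minDim, maxDim
-- ===== SOURCE B (Python) =====
-- def findSpaceDim(space):
--     def bounds(keys):
--         if not keys:
--             return [0, 0, 0], [0, 0, 0]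
--         if len(keys) == 1:
--             k = keys[0]
--             return [min(k[d], 0) for d in range(3)], [max(k[d], 0) for d in range(3)]
--         mid = len(keys) // 2
--         lo1, hi1 = bounds(keys[:mid])
--         lo2, hi2 = bounds(keys[mid:])
--         return [min(a, b) for a, b in zip(lo1, lo2)], [max(a, b) for a, b in zip(hi1, hi2)]
--     return bounds(list(space))
-- ===== Notes on version B (the rewrite author's own statement) =====
-- stated objective: alternative
-- what changed: Replaces A's single iterative scan that mutates two accumulator arrays key by key with a divide-and-conquer recursion: split the key list in halves, recursively compute each half's zero-seeded bounds, and merge them by componentwise min/max.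
import Mathlib
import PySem

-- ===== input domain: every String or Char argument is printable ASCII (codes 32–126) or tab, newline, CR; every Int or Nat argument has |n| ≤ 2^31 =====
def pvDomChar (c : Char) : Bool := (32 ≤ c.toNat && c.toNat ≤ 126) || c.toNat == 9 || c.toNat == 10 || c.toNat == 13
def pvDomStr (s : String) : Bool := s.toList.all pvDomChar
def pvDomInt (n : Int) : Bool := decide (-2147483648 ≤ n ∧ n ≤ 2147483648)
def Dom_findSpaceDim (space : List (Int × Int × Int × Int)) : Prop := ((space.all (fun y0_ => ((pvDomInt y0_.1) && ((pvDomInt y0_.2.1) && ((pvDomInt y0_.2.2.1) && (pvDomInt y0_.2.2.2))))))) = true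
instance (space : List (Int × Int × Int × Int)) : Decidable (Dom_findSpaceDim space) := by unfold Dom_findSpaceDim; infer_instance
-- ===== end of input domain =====

-- B replaces A's single iterative scan (mutating two accumulator arrays key by key)
-- with a divide-and-conquer recursion merging half-bounds by componentwise min/max (alternative).

-- ===== PORT A =====
-- key[dim] for a dict key (x, y, z) (the 4th component is the dict value, unused by A)
def keyAt (key : Int × Int × Int × Int) (dim : Nat) : Int :=
  match dim with
  | 0 => key.1
  | 1 => key.2.1
  | _ => key.2.2.1

-- body of A's inner 'for dim in range(3)' loop
def dimStep (key : Int × Int × Int × Int) (st : List Int × List Int) (dim : Nat) :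
    List Int × List Int :=
  let v := keyAt key dim
  if v < st.1.getD dim 0 then (st.1.set dim v, st.2)
  else if v > st.2.getD dim 0 then (st.1, st.2.set dim v)
  else st

def findSpaceDim (space : List (Int × Int × Int × Int)) : List Int × List Int :=
  space.foldl (fun st key => ([0, 1, 2] : List Nat).foldl (dimStep key) st)
    ([0, 0, 0], [0, 0, 0])

-- ===== PORT B =====
-- B's inner recursive 'bounds(keys)': split at mid, merge componentwise
def boundsB : List (Int × Int × Int × Int) → List Int × List Int
  | [] => ([0, 0, 0], [0, 0, 0])
  | [k] => ([min k.1 0, min k.2.1 0, min k.2.2.1 0],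
            [max k.1 0, max k.2.1 0, max k.2.2.1 0])
  | k1 :: k2 :: rest =>
      let ks := k1 :: k2 :: rest
      let mid := ks.length / 2
      let r1 := boundsB (ks.take mid)
      let r2 := boundsB (ks.drop mid)
      (List.zipWith min r1.1 r2.1, List.zipWith max r1.2 r2.2)
termination_by ks => ks.length
decreasing_by
  · simp [List.length_take]; omega
  · simp [List.length_drop]; omega

def findSpaceDim_alt (space : List (Int × Int × Int × Int)) : List Int × List Int :=
  boundsB space

-- ===== PRECONDITION & SPEC =====
def Spec_findSpaceDim (space : List (Int × Int × Int × Int)) (out : List Int × List Int) : Prop := out = findSpaceDim_alt space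
instance (space : List (Int × Int × Int × Int)) (out : List Int × List Int) : Decidable (Spec_findSpaceDim space out) := by unfold Spec_findSpaceDim; infer_instance

-- ===== CLAIM (what is proved, stated in full; the proofs are below) =====
def Claim_equal_findSpaceDim : Prop := ∀ (space : List (Int × Int × Int × Int)), Dom_findSpaceDim space → Spec_findSpaceDim space (findSpaceDim space)

-- ===== LEMMAS AND PROOFS =====

-- A's branch for one dimension: componentwise min/max update, provided that
-- dimension's min accumulator is ≤ its max accumulator.
theorem dimStep_0 (k : Int × Int × Int × Int) (x0 x1 x2 y0 y1 y2 : Int) (h : x0 ≤ y0) :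
    dimStep k ([x0, x1, x2], [y0, y1, y2]) 0 =
      ([min x0 k.1, x1, x2], [max y0 k.1, y1, y2]) := by
  simp only [dimStep, keyAt, List.getD_cons_zero, List.set]
  split_ifs <;> simp only [Prod.mk.injEq, List.cons.injEq, min_def, max_def,
    and_true] <;> split_ifs <;> omega

theorem dimStep_1 (k : Int × Int × Int × Int) (x0 x1 x2 y0 y1 y2 : Int) (h : x1 ≤ y1) :
    dimStep k ([x0, x1, x2], [y0, y1, y2]) 1 =
      ([x0, min x1 k.2.1, x2], [y0, max y1 k.2.1, y2]) := by
  simp only [dimStep, keyAt, List.getD_cons_succ, List.getD_cons_zero, List.set]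
  split_ifs <;> simp only [Prod.mk.injEq, List.cons.injEq, min_def, max_def,
    and_true, true_and] <;> split_ifs <;> omega

theorem dimStep_2 (k : Int × Int × Int × Int) (x0 x1 x2 y0 y1 y2 : Int) (h : x2 ≤ y2) :
    dimStep k ([x0, x1, x2], [y0, y1, y2]) 2 =
      ([x0, x1, min x2 k.2.2.1], [y0, y1, max y2 k.2.2.1]) := by
  simp only [dimStep, keyAt, List.getD_cons_succ, List.getD_cons_zero, List.set]
  split_ifs <;> simp only [Prod.mk.injEq, List.cons.injEq, min_def, max_def,
    and_true, true_and] <;> split_ifs <;> omega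

-- One key: A's inner dim-loop is the componentwise min/max update of both triples.
theorem inner_step (k : Int × Int × Int × Int) (a0 a1 a2 b0 b1 b2 : Int)
    (h0 : a0 ≤ b0) (h1 : a1 ≤ b1) (h2 : a2 ≤ b2) :
    dimStep k (dimStep k (dimStep k ([a0, a1, a2], [b0, b1, b2]) 0) 1) 2 =
      ([min a0 k.1, min a1 k.2.1, min a2 k.2.2.1],
       [max b0 k.1, max b1 k.2.1, max b2 k.2.2.1]) := by
  rw [dimStep_0 _ _ _ _ _ _ _ h0, dimStep_1 _ _ _ _ _ _ _ h1, dimStep_2 _ _ _ _ _ _ _ h2]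

-- The whole of A's outer loop from arbitrary seeds a ≤ b equals per-column folds.
theorem outer_fold (space : List (Int × Int × Int × Int)) (a0 a1 a2 b0 b1 b2 : Int)
    (h0 : a0 ≤ b0) (h1 : a1 ≤ b1) (h2 : a2 ≤ b2) :
    space.foldl (fun st key => ([0, 1, 2] : List Nat).foldl (dimStep key) st)
        ([a0, a1, a2], [b0, b1, b2]) =
      ([(space.map (fun k => k.1)).foldl min a0,
        (space.map (fun k => k.2.1)).foldl min a1,
        (space.map (fun k => k.2.2.1)).foldl min a2],
       [(space.map (fun k => k.1)).foldl max b0,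
        (space.map (fun k => k.2.1)).foldl max b1,
        (space.map (fun k => k.2.2.1)).foldl max b2]) := by
  induction space generalizing a0 a1 a2 b0 b1 b2 with
  | nil => rfl
  | cons k rest ih =>
      simp only [List.foldl_cons, List.foldl_nil, List.map_cons]
      rw [inner_step k a0 a1 a2 b0 b1 b2 h0 h1 h2]
      exact ih _ _ _ _ _ _ (le_trans (min_le_left _ _) (le_trans h0 (le_max_left _ _)))
        (le_trans (min_le_left _ _) (le_trans h1 (le_max_left _ _)))
        (le_trans (min_le_left _ _) (le_trans h2 (le_max_left _ _)))

-- foldl of min pulls a min out of the seed (and dually for max)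
theorem foldl_min_seed (l : List Int) : ∀ a b : Int,
    l.foldl min (min a b) = min a (l.foldl min b) := by
  induction l with
  | nil => intro a b; rfl
  | cons c l ih =>
      intro a b
      simp only [List.foldl_cons, min_assoc]
      exact ih a (min b c)

theorem foldl_max_seed (l : List Int) : ∀ a b : Int,
    l.foldl max (max a b) = max a (l.foldl max b) := by
  induction l with
  | nil => intro a b; rfl
  | cons c l ih =>
      intro a b
      simp only [List.foldl_cons, max_assoc]
      exact ih a (max b c)

theorem foldl_min_le_seed (l : List Int) : ∀ a : Int, l.foldl min a ≤ a := by
  induction l with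
  | nil => intro a; exact le_rfl
  | cons c l ih => intro a; exact le_trans (ih (min a c)) (min_le_left _ _)

theorem seed_le_foldl_max (l : List Int) : ∀ a : Int, a ≤ l.foldl max a := by
  induction l with
  | nil => intro a; exact le_rfl
  | cons c l ih => intro a; exact le_trans (le_max_left a c) (ih (max a c))

-- zero-seeded fold over an append merges by min / max
theorem foldl_min_append (l1 l2 : List Int) :
    (l1 ++ l2).foldl min 0 = min (l1.foldl min 0) (l2.foldl min 0) := by
  rw [List.foldl_append]
  have h : l1.foldl min 0 = min (l1.foldl min 0) 0 :=
    (min_eq_left (foldl_min_le_seed l1 0)).symm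
  conv_lhs => rw [h]
  rw [foldl_min_seed]

theorem foldl_max_append (l1 l2 : List Int) :
    (l1 ++ l2).foldl max 0 = max (l1.foldl max 0) (l2.foldl max 0) := by
  rw [List.foldl_append]
  have h : l1.foldl max 0 = max (l1.foldl max 0) 0 :=
    (max_eq_left (seed_le_foldl_max l1 0)).symm
  conv_lhs => rw [h]
  rw [foldl_max_seed]

-- B's divide-and-conquer recursion computes the per-column zero-seeded folds.
theorem boundsB_eq (ks : List (Int × Int × Int × Int)) :
    boundsB ks =
      ([(ks.map (fun k => k.1)).foldl min 0,
        (ks.map (fun k => k.2.1)).foldl min 0,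
        (ks.map (fun k => k.2.2.1)).foldl min 0],
       [(ks.map (fun k => k.1)).foldl max 0,
        (ks.map (fun k => k.2.1)).foldl max 0,
        (ks.map (fun k => k.2.2.1)).foldl max 0]) := by
  induction ks using boundsB.induct with
  | case1 => simp [boundsB]
  | case2 k =>
      simp only [boundsB, List.map_cons, List.map_nil, List.foldl_cons, List.foldl_nil]
      simp [min_comm, max_comm]
  | case3 k1 k2 rest ks mid ih1 ih2 =>
      have hsplit : ∀ f : (Int × Int × Int × Int) → Int,
          (k1 :: k2 :: rest).map f =
            ((k1 :: k2 :: rest).take ((k1 :: k2 :: rest).length / 2)).map f ++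
            ((k1 :: k2 :: rest).drop ((k1 :: k2 :: rest).length / 2)).map f := by
        intro f; rw [← List.map_append, List.take_append_drop]
      simp only [boundsB]
      rw [ih1, ih2]
      simp only [hsplit, foldl_min_append, foldl_max_append, List.zipWith]
      rfl

-- ===== VERDICT (by name: the statement is the Claim_ definition above) =====
theorem findSpaceDim_spec : Claim_equal_findSpaceDim := by
  intro space _
  unfold Spec_findSpaceDim findSpaceDim findSpaceDim_alt
  rw [outer_fold space 0 0 0 0 0 0 le_rfl le_rfl le_rfl, boundsB_eq]
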